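-- pv_equiv track=rewrite | github.com/arnavRai10/CS313E | DNA.py | all_substrings
-- ===== SOURCE A (Python) =====
-- def all_substrings(s):
--     # define a list to store all substrings
--     result = []
--
--     # define the length of the window
--     wnd = len(s)
--
--     # generate all substrings
--     while (wnd > 0):
--         idx = 0
--         while (idx + wnd) <= len(s):
--             sub_str = s[idx:idx + wnd]
--             result.append(sub_str)
--             idx += 1
--         # decrease window size
--         wnd = wnd - 1
--
--     # return the result
--     return result
-- ===== SOURCE B (Python) =====
-- def all_substrings(s):
--     # Decorate-sort-undecorate: enumerate (length, start) index pairs in start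
--     # order, stable-sort them by (descending length, ascending start), then
--     # materialise the substrings from the sorted index pairs.
--     n = len(s)
--     pairs = [(j - i, i) for i in range(n) for j in range(i + 1, n + 1)]
--     pairs.sort(key=lambda p: (-p[0], p[1]))
--     return [s[i:i + w] for (w, i) in pairs]
-- ===== Notes on version B (the rewrite author's own statement) =====
-- stated objective: alternative
-- what changed: Replaces A's nested descending-window while loops by a decorate-sort-undecorate scheme: enumerate (length, start) index pairs in start order, sort them by (-length, start), then materialise the substrings from the sorted pairs.
import Mathlib
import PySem

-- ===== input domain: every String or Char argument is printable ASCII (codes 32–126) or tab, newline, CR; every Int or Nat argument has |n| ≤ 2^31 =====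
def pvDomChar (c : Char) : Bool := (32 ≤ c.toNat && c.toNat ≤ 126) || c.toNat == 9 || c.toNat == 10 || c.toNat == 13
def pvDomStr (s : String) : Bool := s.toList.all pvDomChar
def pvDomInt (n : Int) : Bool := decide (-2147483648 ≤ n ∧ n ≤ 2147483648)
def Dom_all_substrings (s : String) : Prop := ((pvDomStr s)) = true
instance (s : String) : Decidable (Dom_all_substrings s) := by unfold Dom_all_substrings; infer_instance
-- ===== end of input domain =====

-- B replaces A's nested descending-window loops by decorate-sort-undecorate over
-- (length, start) index pairs (objective: alternative; return values proved equal).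


-- ===== PORT A =====
-- inner 'while (idx + wnd) <= len(s)' loop; hw records the outer guard wnd > 0
-- (in Python the inner loop is only reached with wnd > 0), used for termination only
def pvAInner (s : String) (n wnd : Int) (hw : 0 < wnd) (idx : Int) (result : List String) :
    List String :=
  if idx + wnd ≤ n then
    pvAInner s n wnd hw (idx + 1) (result ++ [PySem.Str.slice s (some idx) (some (idx + wnd))])
  else result
  termination_by (n - idx).toNat
  decreasing_by omega

-- outer 'while (wnd > 0)' loop
def pvAOuter (s : String) (n wnd : Int) (result : List String) : List String :=
  if h : 0 < wnd then pvAOuter s n (wnd - 1) (pvAInner s n wnd h 0 result)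
  else result
  termination_by wnd.toNat
  decreasing_by omega

def all_substrings (s : String) : List String :=
  pvAOuter s (PySem.Str.len s) (PySem.Str.len s) []

-- ===== PORT B =====
-- pairs = [(j - i, i) for i in range(n) for j in range(i + 1, n + 1)]
-- pairs.sort(key=lambda p: (-p[0], p[1]))   (tuple key → PySem.List.sorted2)
-- return [s[i:i + w] for (w, i) in pairs]
def all_substrings_alt (s : String) : List String :=
  let n := PySem.Str.len s
  let pairs := (PySem.List.pyRange 0 n 1).flatMap (fun i =>
    (PySem.List.pyRange (i + 1) (n + 1) 1).map (fun j => (j - i, i)))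
  let sortedPairs := PySem.List.sorted2 pairs (fun p => -p.1) (fun p => p.2) false
  sortedPairs.map (fun p => PySem.Str.slice s (some p.2) (some (p.2 + p.1)))

-- ===== PRECONDITION & SPEC =====
def Spec_all_substrings (s : String) (out : List String) : Prop := out = all_substrings_alt s
instance (s : String) (out : List String) : Decidable (Spec_all_substrings s out) := by unfold Spec_all_substrings; infer_instance

-- ===== CLAIM (what is proved, stated in full; the proofs are below) =====
def Claim_equal_all_substrings : Prop := ∀ (s : String), Dom_all_substrings s → Spec_all_substrings s (all_substrings s)

-- ===== LEMMAS AND PROOFS =====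

-- the group of substrings of window size w, starts ascending
def pvGroup (s : String) (n w : Int) : List String :=
  (PySem.List.pyRange 0 (n - w + 1) 1).map (fun i => PySem.Str.slice s (some i) (some (i + w)))

-- A's inner loop appends the tail of the group starting at idx
theorem pvAInner_eq (s : String) (n wnd : Int) (hw : 0 < wnd) :
    ∀ (idx : Int) (result : List String),
      pvAInner s n wnd hw idx result =
        result ++ (PySem.List.pyRange idx (n - wnd + 1) 1).map
          (fun i => PySem.Str.slice s (some i) (some (i + wnd))) := by
  intro idx result
  rw [pvAInner]
  split
  · rename_i h
    rw [pvAInner_eq s n wnd hw (idx + 1),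
        PySem.List.pyRange_one_cons (a := idx) (b := n - wnd + 1) (by omega)]
    simp
  · rename_i h
    rw [PySem.List.pyRange_one_eq_nil (by omega)]
    simp
  termination_by idx => (n - idx).toNat
  decreasing_by omega

-- A's outer loop appends the groups wnd, wnd-1, …, 1
theorem pvAOuter_eq (s : String) (n : Int) :
    ∀ (wnd : Int) (result : List String),
      pvAOuter s n wnd result =
        result ++ ((PySem.List.pyRange 1 (wnd + 1) 1).reverse).flatMap (pvGroup s n) := by
  intro wnd result
  rw [pvAOuter]
  split
  · rename_i h
    rw [pvAOuter_eq s n (wnd - 1), pvAInner_eq,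
        PySem.List.pyRange_one_succ_right (a := 1) (b := wnd) (by omega)]
    have : wnd - 1 + 1 = wnd := by omega
    simp [this, pvGroup]
  · rename_i h
    rw [PySem.List.pyRange_one_eq_nil (by omega)]
    simp
  termination_by wnd => wnd.toNat
  decreasing_by omega

-- pyRange with step 1 is strictly increasing
theorem pvRange_pairwise (a b : Int) :
    (PySem.List.pyRange a b 1).Pairwise (· < ·) := by
  by_cases h : a < b
  · rw [PySem.List.pyRange_one_cons h]
    refine List.Pairwise.cons ?_ (pvRange_pairwise (a + 1) b)
    intro x hx
    have := PySem.List.mem_pyRange_one.mp hx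
    omega
  · rw [PySem.List.pyRange_one_eq_nil (by omega)]
    exact List.Pairwise.nil
  termination_by (b - a).toNat
  decreasing_by omega

-- B's flat pair list, in start-major order
def pvFlatPairs (n : Int) : List (Int × Int) :=
  (PySem.List.pyRange 0 n 1).flatMap (fun i =>
    (PySem.List.pyRange (i + 1) (n + 1) 1).map (fun j => (j - i, i)))

-- the same pairs grouped by decreasing length (A's emission order)
def pvGroupedPairs (n : Int) : List (Int × Int) :=
  ((PySem.List.pyRange 1 (n + 1) 1).reverse).flatMap (fun w =>
    (PySem.List.pyRange 0 (n - w + 1) 1).map (fun i => (w, i)))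

theorem pvFlatPairs_mem (n : Int) (p : Int × Int) :
    p ∈ pvFlatPairs n ↔ 1 ≤ p.1 ∧ 0 ≤ p.2 ∧ p.2 + p.1 ≤ n := by
  unfold pvFlatPairs
  simp only [List.mem_flatMap, List.mem_map, PySem.List.mem_pyRange_one]
  constructor
  · rintro ⟨i, hi, j, hj, rfl⟩; simp; omega
  · rintro ⟨h1, h2, h3⟩
    exact ⟨p.2, by omega, p.2 + p.1, by omega, by simp⟩

theorem pvGroupedPairs_mem (n : Int) (p : Int × Int) :
    p ∈ pvGroupedPairs n ↔ 1 ≤ p.1 ∧ 0 ≤ p.2 ∧ p.2 + p.1 ≤ n := by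
  unfold pvGroupedPairs
  simp only [List.mem_flatMap, List.mem_reverse, List.mem_map, PySem.List.mem_pyRange_one]
  constructor
  · rintro ⟨w, hw, i, hi, rfl⟩; simp; omega
  · rintro ⟨h1, h2, h3⟩
    exact ⟨p.1, by omega, p.2, by omega, by simp⟩

theorem pvFlatPairs_nodup (n : Int) : (pvFlatPairs n).Nodup := by
  unfold pvFlatPairs
  rw [List.nodup_flatMap]
  constructor
  · intro i _
    refine List.Nodup.map ?_ ((pvRange_pairwise _ _).imp ne_of_lt)
    intro a b hab
    simpa using congrArg (fun q : Int × Int => q.1 + i) hab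
  · refine ((pvRange_pairwise 0 n).imp ?_)
    intro a b hab
    intro p hpa hpb
    simp only [List.mem_map] at hpa hpb
    obtain ⟨_, _, rfl⟩ := hpa
    obtain ⟨_, _, h⟩ := hpb
    have := congrArg Prod.snd h
    simp at this
    omega

theorem pvGroupedPairs_nodup (n : Int) : (pvGroupedPairs n).Nodup := by
  unfold pvGroupedPairs
  rw [List.nodup_flatMap]
  constructor
  · intro w _
    refine List.Nodup.map ?_ ((pvRange_pairwise _ _).imp ne_of_lt)
    intro a b hab
    simpa using congrArg Prod.snd hab
  · rw [List.pairwise_reverse]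
    refine ((pvRange_pairwise 1 (n + 1)).imp ?_)
    intro a b hab p hpa hpb
    simp only [List.mem_map] at hpa hpb
    obtain ⟨_, _, rfl⟩ := hpa
    obtain ⟨_, _, h⟩ := hpb
    have := congrArg Prod.fst h
    simp at this
    omega

theorem pvGroupedPairs_perm (n : Int) : (pvGroupedPairs n).Perm (pvFlatPairs n) := by
  rw [List.perm_ext_iff_of_nodup (pvGroupedPairs_nodup n) (pvFlatPairs_nodup n)]
  intro p
  rw [pvGroupedPairs_mem, pvFlatPairs_mem]

-- the grouped order is strictly increasing under the lexicographic key (-length, start)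
theorem pvGroupedPairs_pairwise (n : Int) :
    (pvGroupedPairs n).Pairwise
      (fun a b => (toLex (-a.1, a.2) : Int ×ₗ Int) < toLex (-b.1, b.2)) := by
  unfold pvGroupedPairs
  rw [List.pairwise_flatMap]
  constructor
  · intro w _
    rw [List.pairwise_map]
    refine ((pvRange_pairwise _ _).imp ?_)
    intro a b hab
    exact Prod.Lex.toLex_lt_toLex.mpr (Or.inr ⟨rfl, hab⟩)
  · rw [List.pairwise_reverse]
    refine ((pvRange_pairwise 1 (n + 1)).imp ?_)
    intro a b hab p hp q hq
    simp only [List.mem_map] at hp hq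
    obtain ⟨_, _, rfl⟩ := hp
    obtain ⟨_, _, rfl⟩ := hq
    exact Prod.Lex.toLex_lt_toLex.mpr (Or.inl (by omega))

-- sorted2 with integer component keys is sorted under the lexicographic combined key
theorem pvSorted2_eq_sorted_lex (xs : List (Int × Int))
    (k1 k2 : Int × Int → Int) :
    PySem.List.sorted2 xs k1 k2 false =
      PySem.List.sorted xs (fun p => (toLex (k1 p, k2 p) : Int ×ₗ Int)) false := by
  show xs.foldl _ [] = xs.foldl _ []
  have hb : (fun a b => decide (k1 a < k1 b) || (!decide (k1 b < k1 a) && decide (k2 a < k2 b)))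
      = (fun a b => decide ((toLex (k1 a, k2 a) : Int ×ₗ Int) < toLex (k1 b, k2 b))) := by
    funext a b
    rcases lt_trichotomy (k1 a) (k1 b) with h | h | h
    · simp [h, Prod.Lex.toLex_lt_toLex, not_lt_of_gt h]
    · simp [h, Prod.Lex.toLex_lt_toLex]
    · simp [h, not_lt_of_gt h, Prod.Lex.toLex_lt_toLex, ne_of_gt h]
  rw [hb]

theorem pvSortedPairs_eq (n : Int) :
    PySem.List.sorted2 (pvFlatPairs n) (fun p => -p.1) (fun p => p.2) false =
      pvGroupedPairs n := by
  rw [pvSorted2_eq_sorted_lex]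
  exact PySem.List.sorted_eq_of_perm_of_pairwise_lt _ _ _
    (pvGroupedPairs_perm n) (pvGroupedPairs_pairwise n)

-- ===== VERDICT (by name: the statement is the Claim_ definition above) =====
theorem all_substrings_spec : Claim_equal_all_substrings := by
  intro s _
  unfold Spec_all_substrings all_substrings all_substrings_alt
  rw [pvAOuter_eq]
  show _ = ((PySem.List.sorted2 (pvFlatPairs (PySem.Str.len s)) _ _ false).map _)
  rw [pvSortedPairs_eq]
  unfold pvGroupedPairs
  rw [List.map_flatMap]
  refine congrArg (List.flatMap · _) (funext fun w => ?_)
  simp [pvGroup]
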